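-- pv_equiv track=rewrite | github.com/chaitami/amazing | a_maze_ing.py | path_to_coordinates
-- ===== SOURCE A (Python) =====
-- def path_to_coordinates(start: tuple[int,int], directions: list[str]) -> list[tuple[int,int]]:
--     x, y = start
--     coords = [(x, y)]
--     moves = {'N': (0, -1), 'S': (0, 1), 'E': (1, 0), 'W': (-1, 0)}
--
--     for d in directions:
--         dx, dy = moves[d]
--         x += dx
--         y += dy
--         coords.append((x, y))
--     return coords
-- ===== SOURCE B (Python) =====
-- from itertools import accumulate
--
-- def path_to_coordinates(start: tuple[int, int], directions: list[str]) -> list[tuple[int, int]]: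
--     # Decompose into two independent 1-D problems: the x-axis and y-axis tracks,
--     # each a prefix-sum list of that axis's deltas; zip them into the path.
--     moves = {'N': (0, -1), 'S': (0, 1), 'E': (1, 0), 'W': (-1, 0)}
--     dxs = [moves[d][0] for d in directions]
--     dys = [moves[d][1] for d in directions]
--     xs = accumulate(dxs, initial=start[0])
--     ys = accumulate(dys, initial=start[1])
--     return list(zip(xs, ys))
-- ===== Notes on version B (the rewrite author's own statement) =====
-- stated objective: alternative
-- what changed: Instead of one loop threading a 2-D (x,y) accumulator and appending pairs, B splits the task into two independent per-axis subproblems (x-deltas and y-deltas), computes each axis's prefix-sum track separately, and zips the two tracks into the coordinate path.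
import Mathlib
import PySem

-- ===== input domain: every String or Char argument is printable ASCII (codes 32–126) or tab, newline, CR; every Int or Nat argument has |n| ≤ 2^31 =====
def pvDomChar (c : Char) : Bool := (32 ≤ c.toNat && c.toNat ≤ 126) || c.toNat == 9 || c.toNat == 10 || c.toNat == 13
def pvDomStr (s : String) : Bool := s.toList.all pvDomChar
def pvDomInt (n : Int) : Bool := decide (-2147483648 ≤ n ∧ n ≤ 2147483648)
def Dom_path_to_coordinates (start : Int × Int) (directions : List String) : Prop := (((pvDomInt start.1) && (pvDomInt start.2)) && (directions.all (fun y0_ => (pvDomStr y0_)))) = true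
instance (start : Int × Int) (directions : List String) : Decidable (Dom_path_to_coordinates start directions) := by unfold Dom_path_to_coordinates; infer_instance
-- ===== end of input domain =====

-- B splits the work into two independent per-axis prefix-sum tracks zipped together (alternative decomposition).

-- ===== PORT A =====
def pvMoves : PySem.Dict String (Int × Int) :=
  PySem.Dict.ofList [("N", (0, -1)), ("S", (0, 1)), ("E", (1, 0)), ("W", (-1, 0))]

-- the for-loop of A over `directions`, state = (x, y, coords); moves[d] on a key outside
-- pvMoves raises KeyError in Python — those inputs are excluded by Pre_ (getD default unreachable there)
def pvLoopA : List String → Int → Int → List (Int × Int) → List (Int × Int)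
  | [], _, _, coords => coords
  | d :: ds, x, y, coords =>
    let m := PySem.Dict.getD pvMoves d (0, 0)
    pvLoopA ds (x + m.1) (y + m.2) (coords ++ [(x + m.1, y + m.2)])

def path_to_coordinates (start : Int × Int) (directions : List String) : List (Int × Int) :=
  pvLoopA directions start.1 start.2 [(start.1, start.2)]

-- ===== PORT B =====
-- accumulate(ds, initial=x0): the prefix-sum track of one axis
def pvScanAdd : Int → List Int → List Int
  | x, [] => [x]
  | x, d :: ds => x :: pvScanAdd (x + d) ds

def path_to_coordinates_alt (start : Int × Int) (directions : List String) : List (Int × Int) :=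
  let dxs := directions.map (fun d => (PySem.Dict.getD pvMoves d (0, 0)).1)
  let dys := directions.map (fun d => (PySem.Dict.getD pvMoves d (0, 0)).2)
  List.zip (pvScanAdd start.1 dxs) (pvScanAdd start.2 dys)

-- ===== PRECONDITION & SPEC =====
-- A raises KeyError (and B too) on any direction outside {N,S,E,W}; exactly those inputs are excluded.
def Pre_path_to_coordinates (start : Int × Int) (directions : List String) : Prop :=
  ∀ d ∈ directions, d = "N" ∨ d = "S" ∨ d = "E" ∨ d = "W"
instance (start : Int × Int) (directions : List String) : Decidable (Pre_path_to_coordinates start directions) := by unfold Pre_path_to_coordinates; infer_instance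
def pvWitness_path_to_coordinates : (Int × Int) × List String := ((0, 0), ["N", "E", "E", "S"])

def Spec_path_to_coordinates (start : Int × Int) (directions : List String) (out : List (Int × Int)) : Prop := out = path_to_coordinates_alt start directions
instance (start : Int × Int) (directions : List String) (out : List (Int × Int)) : Decidable (Spec_path_to_coordinates start directions out) := by unfold Spec_path_to_coordinates; infer_instance

-- ===== CLAIM (what is proved, stated in full; the proofs are below) =====
def Claim_equal_path_to_coordinates : Prop := ∀ (start : Int × Int) (directions : List String), Dom_path_to_coordinates start directions → Pre_path_to_coordinates start directions → Spec_path_to_coordinates start directions (path_to_coordinates start directions)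

-- ===== LEMMAS AND PROOFS =====
theorem pvLoopA_eq_zip_scans (ds : List String) : ∀ (x y : Int) (coords : List (Int × Int)),
    pvLoopA ds x y coords =
      coords ++ (List.zip (pvScanAdd x (ds.map (fun d => (PySem.Dict.getD pvMoves d (0, 0)).1)))
                          (pvScanAdd y (ds.map (fun d => (PySem.Dict.getD pvMoves d (0, 0)).2)))).tail := by
  induction ds with
  | nil => intro x y coords; simp [pvLoopA, pvScanAdd]
  | cons d ds ih =>
    intro x y coords
    simp only [pvLoopA, List.map_cons, pvScanAdd, List.zip_cons_cons, List.tail_cons]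
    rw [ih]
    cases hx : ds.map (fun d => (PySem.Dict.getD pvMoves d (0, 0)).1) with
    | nil =>
      have : ds = [] := List.map_eq_nil_iff.mp hx
      subst this; simp [pvScanAdd]
    | cons e es =>
      cases ds with
      | nil => simp at hx
      | cons d' ds' =>
        simp [pvScanAdd]

-- ===== VERDICT (by name: the statement is the Claim_ definition above) =====
theorem path_to_coordinates_spec : Claim_equal_path_to_coordinates := by
  intro start directions _ _
  unfold Spec_path_to_coordinates path_to_coordinates path_to_coordinates_alt
  rw [pvLoopA_eq_zip_scans]
  cases directions with
  | nil => simp [pvScanAdd]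
  | cons d ds => simp [pvScanAdd]
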